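-- pv_equiv track=rewrite | github.com/jjzcru/stevens-810 | homeworks/homework 7/HW07_Jose_Cruz.py | web_analyzer
-- ===== SOURCE A (Python) =====
-- from collections import defaultdict, Counter
-- from typing import Dict, List, Tuple, Set
--
-- def web_analyzer(weblogs: List[Tuple[str, str]]) -> List[Tuple[str, List[str]]]:
--     """Create a summary of the weblogs with each distinct site and a sorted
--     list of names of distinct people who visited that site"""
--
--     # Defensive programming / Type checking section
--     if not isinstance(weblogs, List):
--         raise TypeError("weblogs is not instance of List")
--
--     if len(weblogs) == 0:
--         return []
--
--     for weblog in weblogs: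
--         if not isinstance(weblog, Tuple):
--             raise TypeError("log is not instance of Tuple")
--
--         if len(weblog) != 2:
--             raise ValueError("log can only have a length of two")
--
--         if type(weblog[0]) != str or type(weblog[1]) != str:
--             raise ValueError("log values must be strings")
--
--     # Real Program
--     records: Dict[str, Set] = defaultdict(set)
--     list(map(lambda log: records[log[1]].add(log[0]), weblogs))
--     return [(w, sorted(list(e))) for w, e in sorted(records.items())]
-- ===== SOURCE B (Python) =====
-- def web_analyzer(weblogs):
--     """Create a summary of the weblogs with each distinct site and a sorted
--     list of names of distinct people who visited that site"""
--
--     # Defensive programming / Type checking section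
--     if not isinstance(weblogs, list):
--         raise TypeError("weblogs is not instance of List")
--
--     if len(weblogs) == 0:
--         return []
--
--     for weblog in weblogs:
--         if not isinstance(weblog, tuple):
--             raise TypeError("log is not instance of Tuple")
--
--         if len(weblog) != 2:
--             raise ValueError("log can only have a length of two")
--
--         if type(weblog[0]) != str or type(weblog[1]) != str:
--             raise ValueError("log values must be strings")
--
--     # Real Program: sorted distinct sites, then one filtering pass per site
--     sites = sorted({site for _, site in weblogs})
--     return [(site, sorted({v for v, s in weblogs if s == site})) for site in sites]
-- ===== Notes on version B (the rewrite author's own statement) =====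
-- stated objective: simpler
-- what changed: B drops the defaultdict-of-sets grouping pass entirely: it sorts the distinct sites once and builds each site's visitor list by a direct set comprehension filtering the input per site.
import Mathlib
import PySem

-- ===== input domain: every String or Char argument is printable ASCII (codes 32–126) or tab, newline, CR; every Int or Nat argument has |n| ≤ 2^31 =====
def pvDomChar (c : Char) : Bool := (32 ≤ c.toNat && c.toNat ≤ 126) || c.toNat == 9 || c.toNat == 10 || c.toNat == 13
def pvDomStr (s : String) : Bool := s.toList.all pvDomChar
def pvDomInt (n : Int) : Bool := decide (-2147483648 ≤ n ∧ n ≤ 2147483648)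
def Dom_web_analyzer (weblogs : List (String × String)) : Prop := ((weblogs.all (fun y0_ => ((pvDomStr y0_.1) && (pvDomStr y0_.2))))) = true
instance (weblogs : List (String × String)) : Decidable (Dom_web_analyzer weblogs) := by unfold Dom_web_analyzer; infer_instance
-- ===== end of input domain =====

-- B replaces A's one-pass defaultdict(set) grouping by a sorted distinct-site list with a
-- per-site filtering set comprehension (simpler decomposition, same results).
-- The validation preamble raises only on inputs outside the Lean type List (String × String),
-- so both ports are total here.

-- ===== PORT A =====
-- `sorted(records.items())` compares (str, set) tuples; the dict keys are distinct, so the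
-- comparison never reaches the set component: key (·.1) is exact. `sorted(list(e))` is a
-- keyless sort of a set's elements, which is order-independent, so porting through
-- PySem.Set's insertion order is exact.
def web_analyzer (weblogs : List (String × String)) : List (String × List String) :=
  if weblogs.length = 0 then []
  else
    let records : PySem.Dict String (PySem.Set String) :=
      weblogs.foldl
        (fun d log => d.insert log.2 (PySem.Set.add (d.getD log.2 PySem.Set.empty) log.1))
        PySem.Dict.empty
    (PySem.List.sorted records.items (fun p => p.1) false).map
      (fun p => (p.1, PySem.List.sorted p.2 (fun x => x) false))

-- ===== PORT B =====
-- `sorted({...})` is a keyless sort of a set: order-independent, exact through PySem.Set.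
def web_analyzer_alt (weblogs : List (String × String)) : List (String × List String) :=
  if weblogs.length = 0 then []
  else
    let sites := PySem.List.sorted (PySem.Set.ofList (weblogs.map (·.2))) (fun x => x) false
    sites.map (fun site =>
      (site, PySem.List.sorted
               (PySem.Set.ofList ((weblogs.filter (fun l => l.2 == site)).map (·.1)))
               (fun x => x) false))

-- ===== PRECONDITION & SPEC =====
def Spec_web_analyzer (weblogs : List (String × String)) (out : List (String × List String)) : Prop := out = web_analyzer_alt weblogs
instance (weblogs : List (String × String)) (out : List (String × List String)) : Decidable (Spec_web_analyzer weblogs out) := by unfold Spec_web_analyzer; infer_instance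

-- ===== CLAIM (what is proved, stated in full; the proofs are below) =====
def Claim_equal_web_analyzer : Prop := ∀ (weblogs : List (String × String)), Dom_web_analyzer weblogs → Spec_web_analyzer weblogs (web_analyzer weblogs)

-- ===== LEMMAS AND PROOFS =====

-- the grouping fold, looked up at a site, is the fold of Set.add over that site's visitors
lemma foldD_getD (ws : List (String × String)) (d : PySem.Dict String (PySem.Set String)) (s : String) :
    (ws.foldl (fun d log => d.insert log.2 (PySem.Set.add (d.getD log.2 ([] : PySem.Set String)) log.1)) d).getD s ([] : PySem.Set String)
      = (ws.filter (fun l => l.2 == s)).foldl (fun acc l => PySem.Set.add acc l.1) (d.getD s ([] : PySem.Set String)) := by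
  induction ws generalizing d with
  | nil => simp
  | cons hd tl ih =>
    simp only [List.foldl_cons, List.filter_cons]
    rw [ih]
    by_cases h : hd.2 = s
    · simp [h, PySem.Dict.getD_insert_self]
    · have h' : (hd.2 == s) = false := by simp [h]
      simp [h', PySem.Dict.getD_insert, Ne.symm h]

-- at the empty dict the fold is exactly set(visitors of s)
lemma foldD_getD_empty (ws : List (String × String)) (s : String) :
    (ws.foldl (fun d log => d.insert log.2 (PySem.Set.add (d.getD log.2 ([] : PySem.Set String)) log.1)) PySem.Dict.empty).getD s ([] : PySem.Set String)
      = PySem.Set.ofList ((ws.filter (fun l => l.2 == s)).map (·.1)) := by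
  rw [foldD_getD, PySem.Dict.getD_empty, PySem.Set.ofList_eq_foldl, List.foldl_map]

-- keys of the grouping fold = set of sites, in first-occurrence order
lemma foldD_keys (ws : List (String × String)) :
    (ws.foldl (fun d log => d.insert log.2 (PySem.Set.add (d.getD log.2 ([] : PySem.Set String)) log.1)) PySem.Dict.empty).keys
      = PySem.Set.ofList (ws.map (·.2)) := by
  have h := PySem.Dict.keys_foldl_insert_key ws (fun l : String × String => l.2)
      (fun d log => PySem.Set.add (d.getD log.2 ([] : PySem.Set String)) log.1) PySem.Dict.empty
  rw [h]
  simp [PySem.Set.update_nil_left]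

-- sorting a nodup-keyed dict's items by first component = mapping over its sorted keys
lemma sorted_items_eq (d : PySem.Dict String (PySem.Set String)) (xs : List String)
    (hk : d.keys = PySem.Set.ofList xs) :
    PySem.List.sorted d.items (fun p => p.1) false
      = (PySem.List.sorted (PySem.Set.ofList xs) (fun x => x) false).map
          (fun k => (k, d.getD k ([] : PySem.Set String))) := by
  have hnd : d.keys.Nodup := by rw [hk]; exact PySem.Set.nodup_ofList xs
  apply PySem.List.sorted_eq_of_perm_of_pairwise_lt
  · have h1 : (PySem.List.sorted (PySem.Set.ofList xs) (fun x => x) false).Perm d.keys := by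
      rw [hk]; exact PySem.List.sorted_perm _ _ _
    have h2 := h1.map (fun k => (k, d.getD k PySem.Set.empty))
    rw [← PySem.Dict.items_eq_map_keys d hnd PySem.Set.empty] at h2
    exact h2
  · have := PySem.List.sorted_ofList_pairwise_lt (xs := xs)
    rw [List.pairwise_map]
    exact this

-- ===== VERDICT (by name: the statement is the Claim_ definition above) =====
theorem web_analyzer_spec : Claim_equal_web_analyzer := by
  intro weblogs _
  unfold Spec_web_analyzer web_analyzer web_analyzer_alt
  by_cases h : weblogs.length = 0
  · simp [h]
  · simp only [h, if_false, PySem.Set.empty]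
    rw [sorted_items_eq _ _ (foldD_keys weblogs), List.map_map]
    refine List.map_congr_left (fun k _ => ?_)
    rw [Function.comp_apply, foldD_getD_empty]
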